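-- pv_equiv track=rewrite | github.com/afester/CodeSamples | Python/PyQt5/tools.py | hexdumpLines
-- ===== SOURCE A (Python) =====
-- def hexdumpLines(contents):
--     addr = 0
--     hexDump = ""
--     asciiDump = ""
--     column = 0
--     for c in contents:
--         hexDump = hexDump + "{:02X} ".format(c)
--         asciiDump = asciiDump + ( chr(c) if c > 31 and c < 128 else '.')
--         column += 1
--         if (column % 16) == 0:
--             yield (addr, hexDump, asciiDump)
--
--             asciiDump = ""
--             hexDump = ""
--             column = 0
--             addr += 16
--     if column > 0:
--         yield (addr, hexDump, asciiDump)
-- ===== SOURCE B (Python) =====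
-- def hexdumpLines(contents):
--     # Chunk the (materialized) input into 16-byte slices; build each line's
--     # columns with joins -- no per-byte accumulators, column counter or flush.
--     data = list(contents)
--     for i in range(0, len(data), 16):
--         chunk = data[i:i + 16]
--         hexStr = ''.join('{:02X} '.format(c) for c in chunk)
--         asciiStr = ''.join(chr(c) if 31 < c < 128 else '.' for c in chunk)
--         yield (i, hexStr, asciiStr)
-- ===== Notes on version B (the rewrite author's own statement) =====
-- stated objective: simpler
-- what changed: Replaces A's flat per-byte loop with mutable hexDump/asciiDump accumulators, a column counter, a modulo-16 yield test and a trailing flush by slicing the input into 16-byte chunks and building each line's two columns with joins over the chunk.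
import Mathlib
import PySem

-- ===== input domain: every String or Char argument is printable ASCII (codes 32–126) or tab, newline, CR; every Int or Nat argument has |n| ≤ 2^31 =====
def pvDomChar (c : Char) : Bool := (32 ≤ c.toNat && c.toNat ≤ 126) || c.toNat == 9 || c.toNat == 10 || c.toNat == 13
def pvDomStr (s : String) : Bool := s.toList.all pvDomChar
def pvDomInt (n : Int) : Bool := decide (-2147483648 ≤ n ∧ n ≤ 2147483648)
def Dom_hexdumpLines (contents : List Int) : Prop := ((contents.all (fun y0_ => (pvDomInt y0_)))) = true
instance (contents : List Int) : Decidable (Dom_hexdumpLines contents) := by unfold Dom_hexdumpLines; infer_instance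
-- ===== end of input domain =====

-- B replaces A's flat per-byte accumulator loop (column counter, modulo-16 yield, trailing
-- flush) by slicing the input into 16-byte chunks and joining each chunk's columns; same
-- output, same cost (objective: simpler).


-- ===== PORT A =====
-- shared formatting helpers (both Pythons contain the same '{:02X} ' format call and the
-- same chr/'.'-expression; ported once, exactly)

-- one uppercase hex digit
def hexDigitU (n : Nat) : Char := if n < 10 then Char.ofNat (48 + n) else Char.ofNat (55 + n)

-- uppercase hex digits of n (no sign, no padding), most significant first
def hexCharsU (n : Nat) : List Char :=
  if _h : n < 16 then [hexDigitU n] else hexCharsU (n / 16) ++ [hexDigitU (n % 16)]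
decreasing_by exact Nat.div_lt_self (by omega) (by omega)

-- "{:02X} ".format(c): sign-aware zero padding to width 2, then the trailing space
-- (a negative value formats as '-' ++ digits, already ≥ 2 characters wide)
def pyFmt02X (c : Int) : List Char :=
  (if c < 0 then '-' :: hexCharsU (-c).toNat
   else if (hexCharsU c.toNat).length < 2 then '0' :: hexCharsU c.toNat
   else hexCharsU c.toNat) ++ [' ']

-- chr(c) if c > 31 and c < 128 else '.'
def asciiCh (c : Int) : Char := if 31 < c ∧ c < 128 then Char.ofNat c.toNat else '.'

-- A's for-loop over contents, state = (addr, hexDump, asciiDump, column); a yield conses;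
-- at the end of the input the 'if column > 0' flush
def loopA : List Int → Int → List Char → List Char → Int → List (Int × String × String)
  | [], addr, hexDump, asciiDump, column =>
      if column > 0 then [(addr, String.ofList hexDump, String.ofList asciiDump)] else []
  | c :: rest, addr, hexDump, asciiDump, column =>
      let hexDump := hexDump ++ pyFmt02X c
      let asciiDump := asciiDump ++ [asciiCh c]
      let column := column + 1
      if PySem.Int.mod column 16 = 0 then
        (addr, String.ofList hexDump, String.ofList asciiDump) :: loopA rest (addr + 16) [] [] 0
      else
        loopA rest addr hexDump asciiDump column

def hexdumpLines (contents : List Int) : List (Int × String × String) :=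
  loopA contents 0 [] [] 0

-- ===== PORT B =====
-- B's for-loop over range(0, len(data), 16): one line per 16-byte slice data[i:i+16];
-- ''.join of the per-byte pieces is List.flatten on the character lists (exact:
-- concatenation with empty separator), ''.join of one-character pieces is the list itself
def hexdumpLines_alt (contents : List Int) : List (Int × String × String) :=
  (PySem.List.pyRange 0 (PySem.List.len contents) 16).map (fun i =>
    let chunk := PySem.List.slice contents (some i) (some (i + 16))
    (i, String.ofList ((chunk.map pyFmt02X).flatten), String.ofList (chunk.map asciiCh)))

-- ===== PRECONDITION & SPEC =====
def Spec_hexdumpLines (contents : List Int) (out : List (Int × String × String)) : Prop := out = hexdumpLines_alt contents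
instance (contents : List Int) (out : List (Int × String × String)) : Decidable (Spec_hexdumpLines contents out) := by unfold Spec_hexdumpLines; infer_instance

-- ===== CLAIM (what is proved, stated in full; the proofs are below) =====
def Claim_equal_hexdumpLines : Prop := ∀ (contents : List Int), Dom_hexdumpLines contents → Spec_hexdumpLines contents (hexdumpLines contents)

-- ===== LEMMAS AND PROOFS =====

-- proof-side chunk recursion both ports are reduced to: one line per leading 16-byte chunk
def chunkGo (data : List Int) (addr : Int) : List (Int × String × String) :=
  if _h : data = [] then []
  else
    (addr, String.ofList (((data.take 16).map pyFmt02X).flatten),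
      String.ofList ((data.take 16).map asciiCh)) :: chunkGo (data.drop 16) (addr + 16)
termination_by data.length
decreasing_by
  have hp : 0 < data.length := List.length_pos_iff.mpr _h
  simp
  omega

lemma chunkGo_nil (addr : Int) : chunkGo [] addr = [] := by
  unfold chunkGo; simp

lemma chunkGo_cons (data : List Int) (addr : Int) (h : data ≠ []) :
    chunkGo data addr
      = (addr, String.ofList (((data.take 16).map pyFmt02X).flatten),
          String.ofList ((data.take 16).map asciiCh)) :: chunkGo (data.drop 16) (addr + 16) := by
  conv_lhs => unfold chunkGo
  rw [dif_neg h]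

-- the modulo-16 test on a column that has just been incremented to 1..16
lemma mod16_eq_zero_iff (n : Nat) (h : n + 1 ≤ 16) :
    PySem.Int.mod ((n : Int) + 1) 16 = 0 ↔ n + 1 = 16 := by
  rw [PySem.Int.mod_eq_emod_of_pos (by omega)]
  omega

-- running loopA over a final short chunk c on top of the partial state of a prefix p
lemma loopA_chunk (c p : List Int) (addr : Int)
    (hlt : p.length + c.length < 16) (hne : 0 < p.length + c.length) :
    loopA c addr ((p.map pyFmt02X).flatten) (p.map asciiCh) (p.length : Int)
      = [(addr, String.ofList (((p ++ c).map pyFmt02X).flatten), String.ofList ((p ++ c).map asciiCh))] := by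
  induction c generalizing p with
  | nil =>
      simp only [loopA]
      rw [if_pos (by simp at hne ⊢; omega)]
      simp
  | cons x c ih =>
      simp only [loopA]
      rw [if_neg (by rw [mod16_eq_zero_iff p.length (by simp at hlt; omega)]; simp at hlt; omega)]
      have := ih (p := p ++ [x]) (by simp at hlt ⊢; omega) (by simp)
      simpa using this

-- running loopA over a full chunk: p ++ c has exactly 16 bytes, a line is emitted and the
-- state resets
lemma loopA_full (c : List Int) : ∀ (p rest : List Int) (addr : Int),
    p.length + c.length = 16 → p.length < 16 →
    loopA (c ++ rest) addr ((p.map pyFmt02X).flatten) (p.map asciiCh) (p.length : Int)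
      = (addr, String.ofList (((p ++ c).map pyFmt02X).flatten), String.ofList ((p ++ c).map asciiCh))
          :: loopA rest (addr + 16) [] [] 0 := by
  induction c with
  | nil => intro p rest addr h16 hlt; simp at h16; omega
  | cons x c ih =>
      intro p rest addr h16 hlt
      have h16' : p.length + (c.length + 1) = 16 := by simpa using h16
      simp only [List.cons_append, loopA]
      by_cases hfull : p.length + 1 = 16
      · have hc : c = [] := List.eq_nil_of_length_eq_zero (by omega)
        subst hc
        rw [if_pos (by rw [mod16_eq_zero_iff p.length (by omega)]; omega)]
        simp
      · rw [if_neg (by rw [mod16_eq_zero_iff p.length (by omega)]; omega)]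
        have := ih (p := p ++ [x]) rest addr
          (by simp only [List.length_append, List.length_cons, List.length_nil]; omega)
          (by simp only [List.length_append, List.length_cons, List.length_nil]; omega)
        simpa using this

-- A's loop agrees with the chunk recursion from a fresh line state, for every start address
lemma loopA_eq_chunkGo_bounded : ∀ (n : Nat) (l : List Int), l.length ≤ n →
    ∀ (addr : Int), loopA l addr [] [] 0 = chunkGo l addr := by
  intro n
  induction n with
  | zero =>
      intro l hl addr
      have : l = [] := List.eq_nil_of_length_eq_zero (by omega)
      subst this
      rw [chunkGo_nil]
      simp [loopA]
  | succ n ih =>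
      intro l hl addr
      match l with
      | [] => rw [chunkGo_nil]; simp [loopA]
      | (x :: t) =>
        rw [chunkGo_cons _ _ (by simp)]
        by_cases hlen : (x :: t).length < 16
        · have hlen' : t.length + 1 < 16 := by simpa using hlen
          have hdrop : (x :: t).drop 16 = [] := by
            apply List.drop_eq_nil_of_le; simp; omega
          have htake : (x :: t).take 16 = x :: t := by
            apply List.take_of_length_le; simp; omega
          have := loopA_chunk (c := x :: t) (p := []) (addr := addr) (by simpa using hlen) (by simp)
          simp only [List.map_nil, List.flatten_nil, List.nil_append, List.length_nil,
            Nat.cast_zero] at this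
          rw [this, htake, hdrop, chunkGo_nil]
        · have hlen' : 16 ≤ t.length + 1 := by simpa using hlen
          have h16 : ((x :: t).take 16).length = 16 := by
            simp; omega
          have := loopA_full (c := (x :: t).take 16) (p := []) ((x :: t).drop 16) addr
            (by simpa using h16) (by simp)
          simp only [List.map_nil, List.flatten_nil, List.nil_append, List.length_nil,
            Nat.cast_zero] at this
          conv_lhs => rw [← List.take_append_drop 16 (x :: t)]
          rw [this]
          congr 1
          refine ih ((x :: t).drop 16) ?_ _
          simp only [List.length_drop, List.length_cons] at hl ⊢
          omega

-- a positive-step range is empty / peels its first element (specialisation of pyRange_of_pos)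
lemma pyRange16_nil (a b : Int) (h : b ≤ a) : PySem.List.pyRange a b 16 = [] := by
  rw [PySem.List.pyRange_of_pos a b (by omega), if_neg (by omega)]
  simp

lemma pyRange16_cons (a b : Int) (h : a < b) :
    PySem.List.pyRange a b 16 = a :: PySem.List.pyRange (a + 16) b 16 := by
  rw [PySem.List.pyRange_of_pos a b (by omega), PySem.List.pyRange_of_pos (a + 16) b (by omega)]
  rw [if_pos h]
  by_cases h2 : a + 16 < b
  · rw [if_pos h2]
    have hcnt : ((b - a + 16 - 1) / 16).toNat = ((b - (a + 16) + 16 - 1) / 16).toNat + 1 := by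
      omega
    rw [hcnt, List.range_succ_eq_map]
    simp only [List.map_cons, List.map_map, Nat.cast_zero, mul_zero, add_zero]
    congr 1
    apply List.map_congr_left
    intro k _
    simp [Function.comp]
    ring
  · rw [if_neg h2]
    have hcnt : ((b - a + 16 - 1) / 16).toNat = 1 := by omega
    rw [hcnt]
    simp

-- the slice data[i:i+16] at a natural position k inside full is the 16-byte take of the tail
lemma slice16_at (full : List Int) (k : Nat) :
    PySem.List.slice full (some (k : Int)) (some ((k : Int) + 16)) = (full.drop k).take 16 := by
  have h16 : ((k : Int) + 16) = ((k : Int) + ((16 : Nat) : Int)) := by norm_num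
  rw [h16, PySem.List.slice_natCast_add]

-- B's range-stepped map agrees with the chunk recursion: the line at address k is built
-- from the chunk full[k:k+16], i.e. the head of the remaining tail l
lemma mapRange_eq_chunkGo : ∀ (n : Nat) (full l : List Int) (k : Nat), l.length ≤ n →
    full.drop k = l →
    (PySem.List.pyRange (k : Int) ((k : Int) + (l.length : Int)) 16).map (fun i =>
        let chunk := PySem.List.slice full (some i) (some (i + 16))
        (i, String.ofList ((chunk.map pyFmt02X).flatten), String.ofList (chunk.map asciiCh)))
      = chunkGo l (k : Int) := by
  intro n
  induction n with
  | zero =>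
      intro full l k hl hdrop
      have : l = [] := List.eq_nil_of_length_eq_zero (by omega)
      subst this
      rw [chunkGo_nil, pyRange16_nil _ _ (by simp)]
      simp
  | succ n ih =>
      intro full l k hl hdrop
      match l with
      | [] =>
          rw [chunkGo_nil, pyRange16_nil _ _ (by simp)]
          simp
      | (x :: t) =>
          rw [chunkGo_cons _ _ (by simp)]
          rw [pyRange16_cons _ _ (by simp)]
          rw [List.map_cons]
          simp only [slice16_at full k, hdrop]
          congr 1
          by_cases hlen : (x :: t).length ≤ 16
          · have hdrop16 : (x :: t).drop 16 = [] := by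
              apply List.drop_eq_nil_of_le; omega
            rw [hdrop16, chunkGo_nil, pyRange16_nil]
            · simp
            · simp only [List.length_cons] at hlen ⊢
              push_cast
              omega
          · have hk16 : ((k : Int) + 16) = ((k + 16 : Nat) : Int) := by push_cast; ring
            have hend : (k : Int) + ((x :: t).length : Int)
                = ((k + 16 : Nat) : Int) + (((x :: t).drop 16).length : Int) := by
              simp only [List.length_drop, List.length_cons] at *
              push_cast
              omega
            rw [hk16, hend]
            refine ih full ((x :: t).drop 16) (k + 16) ?_ ?_
            · simp only [List.length_drop, List.length_cons] at hl ⊢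
              omega
            · rw [← hdrop, List.drop_drop]

-- ===== VERDICT (by name: the statement is the Claim_ definition above) =====
theorem hexdumpLines_spec : Claim_equal_hexdumpLines := by
  intro contents _
  unfold Spec_hexdumpLines hexdumpLines hexdumpLines_alt
  have hB := mapRange_eq_chunkGo contents.length contents contents 0 (le_refl _) rfl
  simp only [Nat.cast_zero, zero_add, PySem.List.len_eq] at hB ⊢
  rw [hB]
  exact loopA_eq_chunkGo_bounded contents.length contents (le_refl _) 0
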